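-- pv_equiv track=rewrite | github.com/kaivan29/OnboardingxGrok | services/tutorial_generator.py | _select_key_files
-- ===== SOURCE A (Python) =====
-- from typing import Dict, List, Any
--
-- def _select_key_files(
--
--     file_contents: Dict[str, str],
--     max_files: int = 15
-- ) -> Dict[str, str]:
--     """Select key files for analysis."""
--     # Prioritize files by:
--     # 1. Main/entry point files (main.py, index.js, app.py, etc.)
--     # 2. Core module files
--     # 3. Largest files (more content)
--
--     priority_names = ["main", "index", "app", "core", "init", "__main__"]
--
--     def file_priority(file_path: str) -> tuple:
--         filename = file_path.lower().split("/")[-1]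
--         # Check if it's a priority file
--         for i, name in enumerate(priority_names):
--             if name in filename:
--                 return (0, i, -len(file_contents[file_path]))
--         # Otherwise prioritize by size
--         return (1, 0, -len(file_contents[file_path]))
--
--     sorted_files = sorted(file_contents.keys(), key=file_priority)
--     return {f: file_contents[f] for f in sorted_files[:max_files]}
-- ===== SOURCE B (Python) =====
-- def _select_key_files(file_contents, max_files=15):
--     """Select key files for analysis (bucket decomposition: group by first
--     matching priority name, then sort each bucket by content size only)."""
--     priority_names = ["main", "index", "app", "core", "init", "__main__"]
--
--     def match_index(file_path):
--         filename = file_path.lower().split("/")[-1]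
--         for i, name in enumerate(priority_names):
--             if name in filename:
--                 return i
--         return len(priority_names)
--
--     order = []
--     for j in range(len(priority_names) + 1):
--         bucket = [f for f in file_contents if match_index(f) == j]
--         order += sorted(bucket, key=lambda f: -len(file_contents[f]))
--     return {f: file_contents[f] for f in order[:max_files]}
-- ===== Notes on version B (the rewrite author's own statement) =====
-- stated objective: alternative
-- what changed: Replaces the single stable sort under a composite 3-tuple key (group, priority-index, -size) by a bucket decomposition: files are grouped by the first matching priority name (or a last 'other' bucket), each bucket is stably sorted by content size alone, and the buckets are concatenated before truncating to max_files.
import Mathlib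
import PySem

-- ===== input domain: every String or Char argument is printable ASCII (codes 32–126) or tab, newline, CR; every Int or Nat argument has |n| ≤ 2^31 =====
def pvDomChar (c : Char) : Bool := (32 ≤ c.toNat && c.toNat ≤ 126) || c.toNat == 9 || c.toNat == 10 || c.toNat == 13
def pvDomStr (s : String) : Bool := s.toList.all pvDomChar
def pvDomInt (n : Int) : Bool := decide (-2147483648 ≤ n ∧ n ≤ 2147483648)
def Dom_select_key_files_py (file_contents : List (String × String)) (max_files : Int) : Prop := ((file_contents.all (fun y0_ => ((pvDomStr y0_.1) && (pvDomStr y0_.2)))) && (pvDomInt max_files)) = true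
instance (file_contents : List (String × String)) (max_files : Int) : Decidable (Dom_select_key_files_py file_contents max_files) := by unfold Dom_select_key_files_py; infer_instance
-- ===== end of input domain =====

-- B replaces A's one stable sort under a composite 3-tuple key by a bucket decomposition
-- (group by first matching priority name, sort each bucket by size only, concatenate);
-- objective: alternative (same asymptotic cost, genuinely different strategy).

-- ===== PORT A =====
def pvPriorityNames : List String := ["main", "index", "app", "core", "init", "__main__"]

-- filename = file_path.lower().split("/")[-1]; split? is none only for an empty separator
-- (here "/": never), and split never returns an empty list, so [-1] never raises.
def pvFilenameA (file_path : String) : String :=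
  PySem.List.pyGetD ((PySem.Str.split? (PySem.Str.lower file_path) "/").getD []) (-1) ""

-- the 'for i, name in enumerate(priority_names): if name in filename: return …' loop
def pvFirstMatch (filename : String) : List String → Int → Option Int
  | [], _ => none
  | n :: rest, i =>
      if PySem.Str.isIn n filename then some i else pvFirstMatch filename rest (i + 1)

-- file_priority: (0, i, -len(content)) on a priority match, else (1, 0, -len(content));
-- the Python 3-tuple key compares lexicographically: ported via sorted2 (tuple keys) with
-- the first component as κ₁ and the remaining pair as κ₂ = Lex (Int × Int) — exact, since
-- all components are ints under their total order.
def pvFilePriority (file_contents : List (String × String)) (file_path : String) :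
    Int × Lex (Int × Int) :=
  match pvFirstMatch (pvFilenameA file_path) pvPriorityNames 0 with
  | some i => (0, toLex (i, -(PySem.Str.len (PySem.Dict.getD ⟨file_contents⟩ file_path ""))))
  | none => (1, toLex (0, -(PySem.Str.len (PySem.Dict.getD ⟨file_contents⟩ file_path ""))))

def select_key_files_py (file_contents : List (String × String)) (max_files : Int) :
    List (String × String) :=
  let sorted_files :=
    PySem.List.sorted2 (PySem.Dict.keys ⟨file_contents⟩)
      (fun f => (pvFilePriority file_contents f).1) (fun f => (pvFilePriority file_contents f).2)
  ((PySem.List.slice sorted_files none (some max_files)).foldl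
      (fun d f => PySem.Dict.insert d f (PySem.Dict.getD ⟨file_contents⟩ f ""))
      PySem.Dict.empty).items

-- ===== PORT B =====
def pvPriorityNamesB : List String := ["main", "index", "app", "core", "init", "__main__"]

-- B's match_index loop: index of the first matching priority name, else len(priority_names)
def pvMatchLoop (filename : String) : List String → Int → Int
  | [], i => i
  | n :: rest, i =>
      if PySem.Str.isIn n filename then i else pvMatchLoop filename rest (i + 1)

def pvMatchIndex (file_path : String) : Int :=
  pvMatchLoop (PySem.List.pyGetD ((PySem.Str.split? (PySem.Str.lower file_path) "/").getD []) (-1) "")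
    pvPriorityNamesB 0

def pvSizeKey (file_contents : List (String × String)) (f : String) : Int :=
  -(PySem.Str.len (PySem.Dict.getD ⟨file_contents⟩ f ""))

def select_key_files_py_alt (file_contents : List (String × String)) (max_files : Int) :
    List (String × String) :=
  -- for j in range(len(priority_names) + 1): order += sorted(bucket_j, key=-size)
  let order :=
    (PySem.List.pyRange 0 7 1).foldl
      (fun acc j =>
        acc ++
          PySem.List.sorted
            ((PySem.Dict.keys (⟨file_contents⟩ : PySem.Dict String String)).filter
              (fun f => pvMatchIndex f == j))
            (pvSizeKey file_contents))
      []
  ((PySem.List.slice order none (some max_files)).foldl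
      (fun d f => PySem.Dict.insert d f (PySem.Dict.getD ⟨file_contents⟩ f ""))
      PySem.Dict.empty).items

-- ===== PRECONDITION & SPEC =====
def Spec_select_key_files_py (file_contents : List (String × String)) (max_files : Int) (out : List (String × String)) : Prop := out = select_key_files_py_alt file_contents max_files
instance (file_contents : List (String × String)) (max_files : Int) (out : List (String × String)) : Decidable (Spec_select_key_files_py file_contents max_files out) := by unfold Spec_select_key_files_py; infer_instance

-- ===== CLAIM (what is proved, stated in full; the proofs are below) =====
def Claim_equal_select_key_files_py : Prop := ∀ (file_contents : List (String × String)) (max_files : Int), Dom_select_key_files_py file_contents max_files → Spec_select_key_files_py file_contents max_files (select_key_files_py file_contents max_files)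

-- ===== LEMMAS AND PROOFS =====

-- one bucket of B, as a function of the key list
def pvBucket (fc : List (String × String)) (ks : List String) (j : Int) : List String :=
  PySem.List.sorted (ks.filter (fun f => pvMatchIndex f == j)) (pvSizeKey fc)

-- pvMatchLoop vs pvFirstMatch
theorem pvMatchLoop_eq_getD (fn : String) (l : List String) (i : Int) :
    pvMatchLoop fn l i = (pvFirstMatch fn l i).getD (i + l.length) := by
  induction l generalizing i with
  | nil => simp [pvMatchLoop, pvFirstMatch]
  | cons n rest ih =>
      simp only [pvMatchLoop, pvFirstMatch]
      split
      · rfl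
      · rw [ih]; congr 1; simp only [List.length_cons]; push_cast; ring

theorem pvFirstMatch_some_bounds (fn : String) (l : List String) (i k : Int)
    (h : pvFirstMatch fn l i = some k) : i ≤ k ∧ k < i + l.length := by
  induction l generalizing i with
  | nil => simp [pvFirstMatch] at h
  | cons n rest ih =>
      simp only [pvFirstMatch] at h
      split at h
      · cases h
        refine ⟨le_refl _, ?_⟩
        simp only [List.length_cons]
        push_cast
        have : (0:Int) ≤ rest.length := by positivity
        omega
      · obtain ⟨h1, h2⟩ := ih _ h
        constructor
        · omega
        · simp only [List.length_cons] at h2 ⊢; push_cast at h2 ⊢; omega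

theorem pvMatchIndex_bounds (p : String) : 0 ≤ pvMatchIndex p ∧ pvMatchIndex p ≤ 6 := by
  unfold pvMatchIndex
  rw [pvMatchLoop_eq_getD]
  cases h : pvFirstMatch (PySem.List.pyGetD ((PySem.Str.split? (PySem.Str.lower p) "/").getD []) (-1) "") pvPriorityNamesB 0 with
  | none => simp [pvPriorityNamesB]
  | some k =>
      obtain ⟨h1, h2⟩ := pvFirstMatch_some_bounds _ _ _ _ h
      simp only [Option.getD_some]
      simp [pvPriorityNamesB] at h2
      omega

-- A's composite-key comparison (as materialized by sorted2) computes exactly the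
-- lexicographic comparison of (pvMatchIndex, pvSizeKey)
theorem pvBltA_eq (fc : List (String × String)) (a b : String) :
    (decide ((pvFilePriority fc a).1 < (pvFilePriority fc b).1) ||
      (!decide ((pvFilePriority fc b).1 < (pvFilePriority fc a).1) &&
        decide ((pvFilePriority fc a).2 < (pvFilePriority fc b).2))) =
      decide (pvMatchIndex a < pvMatchIndex b ∨
        (pvMatchIndex a = pvMatchIndex b ∧ pvSizeKey fc a < pvSizeKey fc b)) := by
  rw [Bool.eq_iff_iff]
  simp only [Bool.or_eq_true, Bool.and_eq_true, Bool.not_eq_true', decide_eq_true_eq,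
    decide_eq_false_iff_not]
  unfold pvFilePriority pvMatchIndex pvSizeKey pvFilenameA
  rw [pvMatchLoop_eq_getD, pvMatchLoop_eq_getD]
  have hlen : pvPriorityNames = pvPriorityNamesB := rfl
  rw [← hlen]
  cases ha : pvFirstMatch (PySem.List.pyGetD ((PySem.Str.split? (PySem.Str.lower a) "/").getD []) (-1) "") pvPriorityNames 0 with
  | some i =>
      obtain ⟨hi1, hi2⟩ := pvFirstMatch_some_bounds _ _ _ _ ha
      have hi6 : i < 6 := by simpa [pvPriorityNames] using hi2
      cases hb : pvFirstMatch (PySem.List.pyGetD ((PySem.Str.split? (PySem.Str.lower b) "/").getD []) (-1) "") pvPriorityNames 0 with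
      | some k => simp [Prod.Lex.toLex_lt_toLex]
      | none =>
          simp [Prod.Lex.toLex_lt_toLex, pvPriorityNames]
          omega
  | none => -- A-side none
      cases hb : pvFirstMatch (PySem.List.pyGetD ((PySem.Str.split? (PySem.Str.lower b) "/").getD []) (-1) "") pvPriorityNames 0 with
      | some k =>
          obtain ⟨hk1, hk2⟩ := pvFirstMatch_some_bounds _ _ _ _ hb
          have hk6 : k < 6 := by simpa [pvPriorityNames] using hk2
          simp [Prod.Lex.toLex_lt_toLex, pvPriorityNames]
          constructor
          · omega
          · omega
      | none =>
          simp [Prod.Lex.toLex_lt_toLex, pvPriorityNames]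

-- insertBy lemmas
theorem insertBy_append_of_not_before {α : Type} (blt : α → α → Bool) (x : α)
    (l1 l2 : List α) (h : ∀ y ∈ l1, blt x y = false) :
    PySem.List.insertBy blt x (l1 ++ l2) = l1 ++ PySem.List.insertBy blt x l2 := by
  induction l1 with
  | nil => simp
  | cons a t ih =>
      have ha := h a (by simp)
      simp only [List.cons_append, PySem.List.insertBy, ha]
      simp only [Bool.false_eq_true, if_false, List.cons.injEq, true_and]
      exact ih (fun y hy => h y (by simp [hy]))

theorem insertBy_append_of_before {α : Type} (blt : α → α → Bool) (x : α)
    (l1 l2 : List α) (h : ∀ y ∈ l2, blt x y = true) :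
    PySem.List.insertBy blt x (l1 ++ l2) = PySem.List.insertBy blt x l1 ++ l2 := by
  induction l1 with
  | nil =>
      cases l2 with
      | nil => simp
      | cons b t => simp [PySem.List.insertBy, h b (by simp)]
  | cons a t ih =>
      by_cases ha : blt x a = true
      · simp [PySem.List.insertBy, ha]
      · simp only [List.cons_append, PySem.List.insertBy, eq_false_of_ne_true ha]
        simp only [Bool.false_eq_true, if_false, List.cons_append, List.cons.injEq, true_and]
        exact ih

theorem insertBy_congr {α : Type} (blt1 blt2 : α → α → Bool) (x : α) (l : List α)
    (h : ∀ y ∈ l, blt1 x y = blt2 x y) :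
    PySem.List.insertBy blt1 x l = PySem.List.insertBy blt2 x l := by
  induction l with
  | nil => rfl
  | cons a t ih =>
      simp only [PySem.List.insertBy, h a (by simp)]
      split
      · rfl
      · simp only [List.cons.injEq, true_and]
        exact ih (fun y hy => h y (by simp [hy]))

theorem sorted_snoc {α κ : Type} [LT κ] [DecidableLT κ] (xs : List α) (x : α) (key : α → κ) :
    PySem.List.sorted (xs ++ [x]) key =
      PySem.List.insertBy (fun a b => decide (key a < key b)) x (PySem.List.sorted xs key) := by
  rw [PySem.List.sorted_eq_foldl_insertBy, PySem.List.sorted_eq_foldl_insertBy, List.foldl_append]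
  rfl

theorem sorted2_snoc {α κ₁ κ₂ : Type} [LT κ₁] [DecidableLT κ₁] [LT κ₂] [DecidableLT κ₂]
    (xs : List α) (x : α) (k1 : α → κ₁) (k2 : α → κ₂) :
    PySem.List.sorted2 (xs ++ [x]) k1 k2 =
      PySem.List.insertBy
        (fun a b => decide (k1 a < k1 b) || (!decide (k1 b < k1 a) && decide (k2 a < k2 b))) x
        (PySem.List.sorted2 xs k1 k2) := by
  simp only [PySem.List.sorted2, if_neg (by simp : ¬ (false = true)), List.foldl_append,
    List.foldl_cons, List.foldl_nil]

theorem mem_pvBucket (fc : List (String × String)) (ks : List String) (j : Int) (y : String)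
    (hy : y ∈ pvBucket fc ks j) : pvMatchIndex y = j := by
  unfold pvBucket at hy
  rw [PySem.List.mem_sorted] at hy
  simp only [List.mem_filter, beq_iff_eq] at hy
  exact hy.2

-- inserting one element into a flattened run of buckets: skip the strictly-smaller
-- buckets, land in bucket j, stay before the strictly-larger ones
theorem insert_flatten (blt bltL : String → String → Bool) (x : String)
    (B : Int → List String) (pre post : List Int) (j : Int)
    (h1 : ∀ k ∈ pre, ∀ y ∈ B k, blt x y = false)
    (h2 : ∀ k ∈ post, ∀ y ∈ B k, blt x y = true)
    (hc : ∀ y ∈ B j, blt x y = bltL x y) :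
    PySem.List.insertBy blt x (((pre ++ j :: post).map B).flatten) =
      ((pre.map B).flatten) ++ (PySem.List.insertBy bltL x (B j) ++ ((post.map B).flatten)) := by
  induction pre with
  | nil =>
      simp only [List.nil_append, List.map_cons, List.flatten_cons, List.map_nil,
        List.flatten_nil]
      rw [insertBy_append_of_before _ _ _ _ (by
        intro y hy
        simp only [List.mem_flatten, List.mem_map] at hy
        obtain ⟨l, ⟨k, hk, rfl⟩, hyl⟩ := hy
        exact h2 k hk y hyl)]
      rw [insertBy_congr _ _ _ _ hc]
  | cons p pre ih =>
      simp only [List.cons_append, List.map_cons, List.flatten_cons]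
      rw [insertBy_append_of_not_before _ _ _ _ (h1 p (by simp)),
        ih (fun k hk => h1 k (by simp [hk])) ]
      simp [List.append_assoc]

-- the main decomposition: one stable sort under A's composite key = concatenated buckets
set_option maxHeartbeats 2000000 in
theorem sorted_eq_buckets (fc : List (String × String)) (ks : List String) :
    PySem.List.sorted2 ks (fun f => (pvFilePriority fc f).1) (fun f => (pvFilePriority fc f).2) =
      pvBucket fc ks 0 ++ (pvBucket fc ks 1 ++ (pvBucket fc ks 2 ++ (pvBucket fc ks 3 ++
        (pvBucket fc ks 4 ++ (pvBucket fc ks 5 ++ pvBucket fc ks 6))))) := by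
  induction ks using List.reverseRecOn with
  | nil => rfl
  | append_singleton ks x ih =>
      rw [sorted2_snoc, ih]
      obtain ⟨hx0, hx6⟩ := pvMatchIndex_bounds x
      have hfil : ∀ j : Int, pvMatchIndex x ≠ j →
          pvBucket fc (ks ++ [x]) j = pvBucket fc ks j := by
        intro j hj
        have hb : (pvMatchIndex x == j) = false := by simpa using hj
        unfold pvBucket
        rw [List.filter_append]
        simp [List.filter, hb]
      have hfil2 : pvBucket fc (ks ++ [x]) (pvMatchIndex x) =
          PySem.List.insertBy (fun a b => decide (pvSizeKey fc a < pvSizeKey fc b)) x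
            (pvBucket fc ks (pvMatchIndex x)) := by
        unfold pvBucket
        rw [List.filter_append]
        simp only [List.filter, beq_self_eq_true]
        rw [sorted_snoc]
      have hA_false : ∀ k : Int, k < pvMatchIndex x → ∀ y ∈ pvBucket fc ks k,
          (decide ((pvFilePriority fc x).1 < (pvFilePriority fc y).1) ||
            (!decide ((pvFilePriority fc y).1 < (pvFilePriority fc x).1) &&
              decide ((pvFilePriority fc x).2 < (pvFilePriority fc y).2))) = false := by
        intro k hk y hy
        have hJ := mem_pvBucket fc ks k y hy
        rw [pvBltA_eq]
        simp only [decide_eq_false_iff_not, hJ]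
        omega
      have hA_true : ∀ k : Int, pvMatchIndex x < k → ∀ y ∈ pvBucket fc ks k,
          (decide ((pvFilePriority fc x).1 < (pvFilePriority fc y).1) ||
            (!decide ((pvFilePriority fc y).1 < (pvFilePriority fc x).1) &&
              decide ((pvFilePriority fc x).2 < (pvFilePriority fc y).2))) = true := by
        intro k hk y hy
        have hJ := mem_pvBucket fc ks k y hy
        rw [pvBltA_eq]
        simp only [decide_eq_true_eq, hJ]
        omega
      have hcong : ∀ y ∈ pvBucket fc ks (pvMatchIndex x),
          (decide ((pvFilePriority fc x).1 < (pvFilePriority fc y).1) ||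
            (!decide ((pvFilePriority fc y).1 < (pvFilePriority fc x).1) &&
              decide ((pvFilePriority fc x).2 < (pvFilePriority fc y).2))) =
            decide (pvSizeKey fc x < pvSizeKey fc y) := by
        intro y hy
        have hJ := mem_pvBucket fc ks _ y hy
        rw [pvBltA_eq, decide_eq_decide, hJ]
        omega
      have hj : pvMatchIndex x = 0 ∨ pvMatchIndex x = 1 ∨ pvMatchIndex x = 2 ∨
          pvMatchIndex x = 3 ∨ pvMatchIndex x = 4 ∨ pvMatchIndex x = 5 ∨
          pvMatchIndex x = 6 := by omega
      rcases hj with h | h | h | h | h | h | h <;>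
        rw [h] at hfil2 hA_false hA_true hcong
      · rw [hfil 1 (by omega), hfil 2 (by omega), hfil 3 (by omega), hfil 4 (by omega),
          hfil 5 (by omega), hfil 6 (by omega), hfil2]
        have := insert_flatten (fun a b => decide ((pvFilePriority fc a).1 < (pvFilePriority fc b).1) ||
            (!decide ((pvFilePriority fc b).1 < (pvFilePriority fc a).1) &&
              decide ((pvFilePriority fc a).2 < (pvFilePriority fc b).2)))
          (fun a b => decide (pvSizeKey fc a < pvSizeKey fc b)) x (pvBucket fc ks)
          [] [1, 2, 3, 4, 5, 6] 0
          (by intro k hk; simp at hk)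
          (by intro k hk y hy; simp at hk
              rcases hk with rfl | rfl | rfl | rfl | rfl | rfl
              exacts [hA_true 1 (by omega) y hy, hA_true 2 (by omega) y hy,
                hA_true 3 (by omega) y hy, hA_true 4 (by omega) y hy,
                hA_true 5 (by omega) y hy, hA_true 6 (by omega) y hy])
          hcong
        simpa using this
      · rw [hfil 0 (by omega), hfil 2 (by omega), hfil 3 (by omega), hfil 4 (by omega),
          hfil 5 (by omega), hfil 6 (by omega), hfil2]
        have := insert_flatten (fun a b => decide ((pvFilePriority fc a).1 < (pvFilePriority fc b).1) ||
            (!decide ((pvFilePriority fc b).1 < (pvFilePriority fc a).1) &&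
              decide ((pvFilePriority fc a).2 < (pvFilePriority fc b).2)))
          (fun a b => decide (pvSizeKey fc a < pvSizeKey fc b)) x (pvBucket fc ks)
          [0] [2, 3, 4, 5, 6] 1
          (by intro k hk y hy; simp at hk; subst hk; exact hA_false 0 (by omega) y hy)
          (by intro k hk y hy; simp at hk
              rcases hk with rfl | rfl | rfl | rfl | rfl
              exacts [hA_true 2 (by omega) y hy, hA_true 3 (by omega) y hy,
                hA_true 4 (by omega) y hy, hA_true 5 (by omega) y hy,
                hA_true 6 (by omega) y hy])
          hcong
        simpa using this
      · rw [hfil 0 (by omega), hfil 1 (by omega), hfil 3 (by omega), hfil 4 (by omega),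
          hfil 5 (by omega), hfil 6 (by omega), hfil2]
        have := insert_flatten (fun a b => decide ((pvFilePriority fc a).1 < (pvFilePriority fc b).1) ||
            (!decide ((pvFilePriority fc b).1 < (pvFilePriority fc a).1) &&
              decide ((pvFilePriority fc a).2 < (pvFilePriority fc b).2)))
          (fun a b => decide (pvSizeKey fc a < pvSizeKey fc b)) x (pvBucket fc ks)
          [0, 1] [3, 4, 5, 6] 2
          (by intro k hk y hy; simp at hk
              rcases hk with rfl | rfl
              exacts [hA_false 0 (by omega) y hy, hA_false 1 (by omega) y hy])
          (by intro k hk y hy; simp at hk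
              rcases hk with rfl | rfl | rfl | rfl
              exacts [hA_true 3 (by omega) y hy, hA_true 4 (by omega) y hy,
                hA_true 5 (by omega) y hy, hA_true 6 (by omega) y hy])
          hcong
        simpa using this
      · rw [hfil 0 (by omega), hfil 1 (by omega), hfil 2 (by omega), hfil 4 (by omega),
          hfil 5 (by omega), hfil 6 (by omega), hfil2]
        have := insert_flatten (fun a b => decide ((pvFilePriority fc a).1 < (pvFilePriority fc b).1) ||
            (!decide ((pvFilePriority fc b).1 < (pvFilePriority fc a).1) &&
              decide ((pvFilePriority fc a).2 < (pvFilePriority fc b).2)))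
          (fun a b => decide (pvSizeKey fc a < pvSizeKey fc b)) x (pvBucket fc ks)
          [0, 1, 2] [4, 5, 6] 3
          (by intro k hk y hy; simp at hk
              rcases hk with rfl | rfl | rfl
              exacts [hA_false 0 (by omega) y hy, hA_false 1 (by omega) y hy,
                hA_false 2 (by omega) y hy])
          (by intro k hk y hy; simp at hk
              rcases hk with rfl | rfl | rfl
              exacts [hA_true 4 (by omega) y hy, hA_true 5 (by omega) y hy,
                hA_true 6 (by omega) y hy])
          hcong
        simpa using this
      · rw [hfil 0 (by omega), hfil 1 (by omega), hfil 2 (by omega), hfil 3 (by omega),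
          hfil 5 (by omega), hfil 6 (by omega), hfil2]
        have := insert_flatten (fun a b => decide ((pvFilePriority fc a).1 < (pvFilePriority fc b).1) ||
            (!decide ((pvFilePriority fc b).1 < (pvFilePriority fc a).1) &&
              decide ((pvFilePriority fc a).2 < (pvFilePriority fc b).2)))
          (fun a b => decide (pvSizeKey fc a < pvSizeKey fc b)) x (pvBucket fc ks)
          [0, 1, 2, 3] [5, 6] 4
          (by intro k hk y hy; simp at hk
              rcases hk with rfl | rfl | rfl | rfl
              exacts [hA_false 0 (by omega) y hy, hA_false 1 (by omega) y hy,
                hA_false 2 (by omega) y hy, hA_false 3 (by omega) y hy])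
          (by intro k hk y hy; simp at hk
              rcases hk with rfl | rfl
              exacts [hA_true 5 (by omega) y hy, hA_true 6 (by omega) y hy])
          hcong
        simpa using this
      · rw [hfil 0 (by omega), hfil 1 (by omega), hfil 2 (by omega), hfil 3 (by omega),
          hfil 4 (by omega), hfil 6 (by omega), hfil2]
        have := insert_flatten (fun a b => decide ((pvFilePriority fc a).1 < (pvFilePriority fc b).1) ||
            (!decide ((pvFilePriority fc b).1 < (pvFilePriority fc a).1) &&
              decide ((pvFilePriority fc a).2 < (pvFilePriority fc b).2)))
          (fun a b => decide (pvSizeKey fc a < pvSizeKey fc b)) x (pvBucket fc ks)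
          [0, 1, 2, 3, 4] [6] 5
          (by intro k hk y hy; simp at hk
              rcases hk with rfl | rfl | rfl | rfl | rfl
              exacts [hA_false 0 (by omega) y hy, hA_false 1 (by omega) y hy,
                hA_false 2 (by omega) y hy, hA_false 3 (by omega) y hy,
                hA_false 4 (by omega) y hy])
          (by intro k hk y hy; simp at hk; subst hk; exact hA_true 6 (by omega) y hy)
          hcong
        simpa using this
      · rw [hfil 0 (by omega), hfil 1 (by omega), hfil 2 (by omega), hfil 3 (by omega),
          hfil 4 (by omega), hfil 5 (by omega), hfil2]
        have := insert_flatten (fun a b => decide ((pvFilePriority fc a).1 < (pvFilePriority fc b).1) ||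
            (!decide ((pvFilePriority fc b).1 < (pvFilePriority fc a).1) &&
              decide ((pvFilePriority fc a).2 < (pvFilePriority fc b).2)))
          (fun a b => decide (pvSizeKey fc a < pvSizeKey fc b)) x (pvBucket fc ks)
          [0, 1, 2, 3, 4, 5] [] 6
          (by intro k hk y hy; simp at hk
              rcases hk with rfl | rfl | rfl | rfl | rfl | rfl
              exacts [hA_false 0 (by omega) y hy, hA_false 1 (by omega) y hy,
                hA_false 2 (by omega) y hy, hA_false 3 (by omega) y hy,
                hA_false 4 (by omega) y hy, hA_false 5 (by omega) y hy])
          (by intro k hk; simp at hk)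
          hcong
        simpa using this

-- ===== VERDICT (by name: the statement is the Claim_ definition above) =====
theorem select_key_files_py_spec : Claim_equal_select_key_files_py := by
  intro fc mf _hdom
  unfold Spec_select_key_files_py select_key_files_py select_key_files_py_alt
  have hr : PySem.List.pyRange 0 7 1 = [0, 1, 2, 3, 4, 5, 6] := by decide
  rw [hr]
  simp only [List.foldl_cons, List.foldl_nil, List.nil_append]
  rw [sorted_eq_buckets fc (PySem.Dict.keys ⟨fc⟩)]
  simp only [pvBucket, List.append_assoc]
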